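-- pv_equiv track=rewrite | github.com/nathan-lindstedt/randomization_tests | src/randomization_tests/permutations.py | _unrank_restricted_label_perm
-- ===== SOURCE A (Python) =====
-- import math
--
-- def _unrank_permutation(k: int, n: int) -> list[int]:
--     """Convert rank *k* to the *k*-th lexicographic permutation of ``[0..n-1]``.
--
--     Args:
--         k: Rank in ``[0, n!)``.
--         n: Length of the permutation.
--
--     Returns:
--         List of *n* integers representing the permutation.
--     """
--     available = list(range(n))
--     result: list[int] = []
--     for i in range(n, 0, -1):
--         f = math.factorial(i - 1)
--         idx, k = divmod(k, f)
--         result.append(available.pop(idx))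
--     return result
--
-- def _unrank_restricted_label_perm(
--     rank: int,
--     cell_sizes: list[int],
-- ) -> list[int]:
--     """Decode a rank to a restricted label permutation (same-size swaps).
--
--     The rank space is ``[0, ∏_s count_s!)`` — a mixed-radix encoding
--     where each size group contributes ``count_s!`` factor.
--
--     Args:
--         rank: Integer rank in ``[0, total)``.
--         cell_sizes: Per-cell sizes ``[n_0, n_1, …, n_{G-1}]``.
--
--     Returns:
--         A list of length G — a valid restricted label permutation.
--     """
--     from collections import defaultdict
--
--     G = len(cell_sizes)
--     label_perm = list(range(G))
--
--     # Group cell indices by size.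
--     size_groups: dict[int, list[int]] = defaultdict(list)
--     for c, s in enumerate(cell_sizes):
--         size_groups[s].append(c)
--
--     # Decode via mixed-radix decomposition (one group at a time).
--     remaining = rank
--     for members in size_groups.values():
--         k = len(members)
--         if k <= 1:
--             continue
--         group_total = math.factorial(k)
--         group_rank = remaining % group_total
--         remaining //= group_total
--         perm_within = _unrank_permutation(group_rank, k)
--         for dst_idx, src_idx in zip(range(k), perm_within, strict=True):
--             label_perm[members[dst_idx]] = members[src_idx]
--
--     return label_perm
-- ===== SOURCE B (Python) =====
-- import math
--
--
-- def _unrank_restricted_label_perm(rank, cell_sizes):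
--     """Decode a rank to a restricted label permutation (same-size swaps).
--
--     Alternative decomposition: distinct sizes are collected in first-occurrence
--     order, members are found by filtering, and each group's permutation is
--     decoded from its factoradic digits right-to-left (prepend + shift), with
--     no mutable 'available' list and no positional pop.
--     """
--     G = len(cell_sizes)
--     label_perm = list(range(G))
--
--     seen = []
--     for s in cell_sizes:
--         if s not in seen:
--             seen.append(s)
--
--     remaining = rank
--     for size in seen:
--         members = [c for c, s in enumerate(cell_sizes) if s == size]
--         k = len(members)
--         if k <= 1:
--             continue
--         remaining, group_rank = divmod(remaining, math.factorial(k))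
--
--         # factoradic digits, least-significant first
--         code = []
--         for b in range(1, k + 1):
--             group_rank, d = divmod(group_rank, b)
--             code.append(d)
--
--         # build the lexicographic permutation back-to-front
--         perm = []
--         for d in code:
--             perm = [d] + [x + 1 if x >= d else x for x in perm]
--
--         for dst_idx, src_idx in enumerate(perm):
--             label_perm[members[dst_idx]] = members[src_idx]
--
--     return label_perm
-- ===== Notes on version B (the rewrite author's own statement) =====
-- stated objective: alternative
-- what changed: Replaces the defaultdict grouping with a first-occurrence size list plus filtering, and replaces the pop-from-available lexicographic unranking with factoradic digit extraction followed by a back-to-front prepend-and-shift decode (no mutable available list, no positional pop).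
import Mathlib
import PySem

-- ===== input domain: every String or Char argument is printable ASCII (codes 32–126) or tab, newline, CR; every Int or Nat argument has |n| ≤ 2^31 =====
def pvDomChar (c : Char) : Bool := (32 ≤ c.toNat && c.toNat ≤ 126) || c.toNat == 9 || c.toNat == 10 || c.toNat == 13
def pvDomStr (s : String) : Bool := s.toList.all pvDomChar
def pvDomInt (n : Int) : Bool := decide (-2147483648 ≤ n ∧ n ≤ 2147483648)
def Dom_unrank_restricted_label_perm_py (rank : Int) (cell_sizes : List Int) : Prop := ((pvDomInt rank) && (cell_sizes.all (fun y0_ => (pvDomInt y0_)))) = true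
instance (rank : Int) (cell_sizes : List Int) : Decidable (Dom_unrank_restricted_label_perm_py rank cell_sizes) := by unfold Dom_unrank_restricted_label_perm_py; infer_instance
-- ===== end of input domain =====

-- B replaces A's defaultdict grouping by a first-occurrence size list plus filtering, and A's
-- pop-from-available lexicographic unranking by factoradic digits decoded back-to-front
-- (prepend-and-shift); objective: alternative algorithm, same results.

-- math.factorial (exact for n ≥ 0; both programs call it only on group sizes, which are ≥ 0)
def pyFactorial (n : Int) : Int := (Nat.factorial n.toNat : Int)

-- ===== PORT A =====
-- helper _unrank_permutation: available = list(range(n)); for i in range(n, 0, -1):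
--   f = (i-1)!; idx, k = divmod(k, f); result.append(available.pop(idx))
def unrank_permutation_py (k : Int) (n : Int) : List Int :=
  let fin := (PySem.List.pyRange n 0 (-1)).foldl
    (fun (st : List Int × List Int × Int) i =>
      match PySem.Int.divmod? st.2.2 (pyFactorial (i - 1)) with
      | some qr =>
        match PySem.List.pop? st.1 qr.1 with
        | some xr => (xr.2, st.2.1 ++ [xr.1], qr.2)
        | none => (st.1, st.2.1, qr.2)   -- IndexError in Python; unreachable from the entry function
      | none => st)                      -- ZeroDivisionError; unreachable (factorial ≥ 1)
    (PySem.List.pyRange 0 n 1, ([], k))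
  fin.2.1

def unrank_restricted_label_perm_py (rank : Int) (cell_sizes : List Int) : List Int :=
  let G : Int := (cell_sizes.length : Int)
  let label_perm := PySem.List.pyRange 0 G 1
  -- size_groups: defaultdict(list); for c, s in enumerate(cell_sizes): size_groups[s].append(c)
  let size_groups := (PySem.List.enumerate cell_sizes).foldl
      (fun d p => d.modify p.2 [] (fun v => v ++ [p.1])) (PySem.Dict.empty : PySem.Dict Int (List Int))
  let fin := size_groups.values.foldl
    (fun (st : List Int × Int) members =>
      let k : Int := (members.length : Int)
      if k ≤ 1 then st
      else
        let group_total := pyFactorial k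
        let group_rank := PySem.Int.mod st.2 group_total
        let remaining := PySem.Int.floordiv st.2 group_total
        let perm_within := unrank_permutation_py group_rank k
        -- indices members[dst]/members[src] are always in range here, so pyGetD/pySetD are exact
        let lp := ((PySem.List.pyRange 0 k 1).zip perm_within).foldl
          (fun lp p => PySem.List.pySetD lp (PySem.List.pyGetD members p.1 0) (PySem.List.pyGetD members p.2 0)) st.1
        (lp, remaining))
    (label_perm, rank)
  fin.1

-- ===== PORT B =====
def unrank_restricted_label_perm_py_alt (rank : Int) (cell_sizes : List Int) : List Int :=
  let G : Int := (cell_sizes.length : Int)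
  let label_perm := PySem.List.pyRange 0 G 1
  -- seen: distinct sizes in first-occurrence order
  let seen := cell_sizes.foldl (fun seen s => if seen.contains s then seen else seen ++ [s]) ([] : List Int)
  let fin := seen.foldl
    (fun (st : List Int × Int) size =>
      let members := ((PySem.List.enumerate cell_sizes).filter (fun p => p.2 == size)).map (fun p => p.1)
      let k : Int := (members.length : Int)
      if k ≤ 1 then st
      else
        match PySem.Int.divmod? st.2 (pyFactorial k) with
        | some qr =>
          -- factoradic digits, least-significant first
          let code := ((PySem.List.pyRange 1 (k + 1) 1).foldl
            (fun (cst : Int × List Int) b =>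
              match PySem.Int.divmod? cst.1 b with
              | some dr => (dr.1, cst.2 ++ [dr.2])
              | none => cst)               -- unreachable: b ≥ 1
            (qr.2, [])).2
          -- build the lexicographic permutation back-to-front
          let perm := code.foldl (fun perm d => d :: perm.map (fun x => if d ≤ x then x + 1 else x)) []
          let lp := (PySem.List.enumerate perm).foldl
            (fun lp p => PySem.List.pySetD lp (PySem.List.pyGetD members p.1 0) (PySem.List.pyGetD members p.2 0)) st.1
          (lp, qr.1)
        | none => st)                      -- unreachable: k! ≥ 2
    (label_perm, rank)
  fin.1

-- ===== PRECONDITION & SPEC =====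
def Spec_unrank_restricted_label_perm_py (rank : Int) (cell_sizes : List Int) (out : List Int) : Prop := out = unrank_restricted_label_perm_py_alt rank cell_sizes
instance (rank : Int) (cell_sizes : List Int) (out : List Int) : Decidable (Spec_unrank_restricted_label_perm_py rank cell_sizes out) := by unfold Spec_unrank_restricted_label_perm_py; infer_instance

-- ===== CLAIM (what is proved, stated in full; the proofs are below) =====
def Claim_equal_unrank_restricted_label_perm_py : Prop := ∀ (rank : Int) (cell_sizes : List Int), Dom_unrank_restricted_label_perm_py rank cell_sizes → Spec_unrank_restricted_label_perm_py rank cell_sizes (unrank_restricted_label_perm_py rank cell_sizes)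

-- ===== LEMMAS AND PROOFS =====

-- recursion form of A's pop loop (digits taken most-significant first)
def pvPop : Nat → List Int → Int → List Int
  | 0, _, _ => []
  | (n+1), avail, k =>
    match PySem.List.pop? avail (PySem.Int.floordiv k (n.factorial : Int)) with
    | some xr => xr.1 :: pvPop n xr.2 (PySem.Int.mod k (n.factorial : Int))
    | none => pvPop n avail (PySem.Int.mod k (n.factorial : Int))

-- recursion form (from the back) of B's factoradic digit list, least-significant first
def pvCode : Nat → Int → List Int
  | 0, _ => []
  | (n+1), g => pvCode n g ++ [PySem.Int.mod (PySem.Int.floordiv g (n.factorial : Int)) ((n : Int) + 1)]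

lemma pv_divmod_ne (a b : Int) (hb : b ≠ 0) :
    PySem.Int.divmod? a b = some (PySem.Int.floordiv a b, PySem.Int.mod a b) := by
  simp [PySem.Int.divmod?, hb, PySem.Int.floordiv, PySem.Int.mod]

lemma pv_fac_pos (n : Int) : 0 < pyFactorial n := by
  simpa [pyFactorial] using Nat.factorial_pos n.toNat

lemma pv_bridgeA : ∀ (n : Nat) (avail res : List Int) (k : Int),
    ((PySem.List.pyRange (n : Int) 0 (-1)).foldl
      (fun (st : List Int × List Int × Int) i =>
        match PySem.Int.divmod? st.2.2 (pyFactorial (i - 1)) with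
        | some qr =>
          match PySem.List.pop? st.1 qr.1 with
          | some xr => (xr.2, st.2.1 ++ [xr.1], qr.2)
          | none => (st.1, st.2.1, qr.2)
        | none => st)
      (avail, res, k)).2.1 = res ++ pvPop n avail k := by
  intro n
  induction n with
  | zero =>
    intro avail res k
    rw [PySem.List.pyRange_neg_one_eq_nil (by norm_num)]
    simp [pvPop]
  | succ n ih =>
    intro avail res k
    rw [PySem.List.pyRange_neg_one_cons (by push_cast; omega)]
    have hfac : pyFactorial (((n+1 : Nat) : Int) - 1) = (n.factorial : Int) := by
      have : ((n+1 : Nat) : Int) - 1 = (n : Int) := by push_cast; ring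
      rw [this]
      simp [pyFactorial]
    have hne : (n.factorial : Int) ≠ 0 := by
      have := Nat.factorial_pos n; omega
    have hc : ((n+1 : Nat) : Int) - 1 = (n : Int) := by push_cast; ring
    simp only [List.foldl_cons, hfac, pv_divmod_ne _ _ hne]
    cases hp : PySem.List.pop? avail (PySem.Int.floordiv k (n.factorial : Int)) with
    | some xr =>
      simp only [hc, ih, pvPop, hp]
      simp [List.append_assoc]
    | none =>
      simp only [hc, ih, pvPop, hp]

lemma pv_unrank_eq (n : Nat) (k : Int) :
    unrank_permutation_py k (n : Int) = pvPop n (PySem.List.pyRange 0 (n : Int) 1) k := by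
  simpa [unrank_permutation_py] using pv_bridgeA n (PySem.List.pyRange 0 (n : Int) 1) [] k

-- floor division composes for positive divisors
lemma pv_fdiv_fdiv (g : Int) (a b : Int) (ha : 0 < a) (hb : 0 < b) :
    PySem.Int.floordiv (PySem.Int.floordiv g a) b = PySem.Int.floordiv g (a * b) := by
  rw [PySem.Int.floordiv_eq_ediv_of_pos ha, PySem.Int.floordiv_eq_ediv_of_pos hb,
    PySem.Int.floordiv_eq_ediv_of_pos (by positivity)]
  exact Int.ediv_ediv_of_nonneg (le_of_lt ha)

lemma pv_bridgeC : ∀ (n : Nat) (g : Int) (acc : List Int),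
    (PySem.List.pyRange 1 ((n : Int) + 1) 1).foldl
      (fun (cst : Int × List Int) b =>
        match PySem.Int.divmod? cst.1 b with
        | some dr => (dr.1, cst.2 ++ [dr.2])
        | none => cst)
      (g, acc) = (PySem.Int.floordiv g (n.factorial : Int), acc ++ pvCode n g) := by
  intro n
  induction n with
  | zero =>
    intro g acc
    rw [PySem.List.pyRange_one_eq_nil (by norm_num)]
    simp [pvCode, PySem.Int.floordiv, Int.fdiv_one]
  | succ n ih =>
    intro g acc
    have hsplit : PySem.List.pyRange 1 (((n+1 : Nat) : Int) + 1) 1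
        = PySem.List.pyRange 1 ((n : Int) + 1) 1 ++ [(n : Int) + 1] := by
      have : ((n+1 : Nat) : Int) + 1 = ((n : Int) + 1) + 1 := by push_cast; ring
      rw [this, PySem.List.pyRange_one_succ_right (by omega)]
    rw [hsplit, List.foldl_append, ih g acc]
    have hne : ((n : Int) + 1) ≠ 0 := by omega
    simp only [List.foldl_cons, List.foldl_nil, pv_divmod_ne _ _ hne]
    have hq : (n.factorial : Int) * ((n : Int) + 1) = ((n+1).factorial : Int) := by
      push_cast [Nat.factorial_succ]; ring
    rw [pv_fdiv_fdiv g (n.factorial : Int) ((n : Int) + 1)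
          (by exact_mod_cast Nat.factorial_pos n) (by omega), hq, pvCode]
    simp [List.append_assoc]

lemma pv_pop?_map (f : Int → Int) (l : List Int) (i : Int) :
    PySem.List.pop? (l.map f) i =
      (PySem.List.pop? l i).map (fun xr => (f xr.1, xr.2.map f)) := by
  simp only [PySem.List.pop?, List.length_map]
  cases h : PySem.List.pyIdx? l.length i with
  | none => simp
  | some k =>
    simp only [Option.bind_some, List.getElem?_map]
    cases hk : l[k]? with
    | none => simp
    | some x => simp [List.eraseIdx_map]

lemma pv_pvPop_map (f : Int → Int) : ∀ (n : Nat) (avail : List Int) (k : Int),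
    pvPop n (avail.map f) k = (pvPop n avail k).map f := by
  intro n
  induction n with
  | zero => intro avail k; rfl
  | succ n ih =>
    intro avail k
    rw [pvPop, pvPop, pv_pop?_map]
    cases PySem.List.pop? avail (PySem.Int.floordiv k (n.factorial : Int)) with
    | none => simp [ih]
    | some xr => simp [ih]

lemma pv_code_natCast_mod : ∀ (n : Nat) (m : Nat),
    pvCode n ((m % n.factorial : Nat) : Int) = pvCode n (m : Int) := by
  intro n
  induction n with
  | zero => intro m; rfl
  | succ n ih =>
    intro m
    rw [pvCode, pvCode]
    have h1 : pvCode n ((m % (n+1).factorial : Nat) : Int) = pvCode n (m : Int) := by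
      have hd : n.factorial ∣ (n+1).factorial := Nat.factorial_dvd_factorial (by omega)
      calc pvCode n ((m % (n+1).factorial : Nat) : Int)
          = pvCode n (((m % (n+1).factorial) % n.factorial : Nat) : Int) := (ih _).symm
        _ = pvCode n ((m % n.factorial : Nat) : Int) := by rw [Nat.mod_mod_of_dvd m hd]
        _ = pvCode n (m : Int) := ih m
    rw [h1]
    have h2 : PySem.Int.mod (PySem.Int.floordiv ((m % (n+1).factorial : Nat) : Int) (n.factorial : Int)) ((n : Int) + 1)
        = PySem.Int.mod (PySem.Int.floordiv (m : Int) (n.factorial : Int)) ((n : Int) + 1) := by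
      have hc : ((n : Int) + 1) = ((n + 1 : Nat) : Int) := by push_cast; ring
      rw [hc, PySem.Int.floordiv_natCast, PySem.Int.floordiv_natCast,
        PySem.Int.mod_natCast, PySem.Int.mod_natCast]
      congr 1
      have : (n+1).factorial = n.factorial * (n+1) := by
        rw [Nat.factorial_succ]; ring
      rw [this, Nat.mod_mul_right_div_self]
      exact Nat.mod_mod_of_dvd _ dvd_rfl
    rw [h2]

lemma pv_code_mod (n : Nat) (g : Int) (hg : 0 ≤ g) :
    pvCode n (PySem.Int.mod g (n.factorial : Int)) = pvCode n g := by
  obtain ⟨m, rfl⟩ : ∃ m : Nat, g = (m : Int) := ⟨g.toNat, (Int.toNat_of_nonneg hg).symm⟩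
  rw [PySem.Int.mod_natCast, pv_code_natCast_mod]

lemma pv_map_add_one_pyRange (a b : Int) :
    (PySem.List.pyRange a b 1).map (fun x => x + 1) = PySem.List.pyRange (a + 1) (b + 1) 1 := by
  rw [PySem.List.pyRange_one, PySem.List.pyRange_one]
  have : b + 1 - (a + 1) = b - a := by ring
  rw [this, List.map_map]
  exact List.map_congr_left (fun k _ => by simp; ring)

lemma pv_erase_range (n j : Nat) (hj : j < n + 1) :
    (PySem.List.pyRange 0 ((n : Int) + 1) 1).eraseIdx j =
      (PySem.List.pyRange 0 (n : Int) 1).map (fun x => if (j : Int) ≤ x then x + 1 else x) := by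
  have hsplit : PySem.List.pyRange 0 ((n : Int) + 1) 1
      = PySem.List.pyRange 0 (j : Int) 1 ++ ((j : Int) :: PySem.List.pyRange ((j : Int) + 1) ((n : Int) + 1) 1) := by
    rw [PySem.List.pyRange_one_append 0 (j : Int) ((n : Int) + 1) (by positivity) (by omega),
      PySem.List.pyRange_one_cons (a := (j : Int)) (b := (n : Int) + 1) (by omega)]
  have hlen : (PySem.List.pyRange 0 (j : Int) 1).length = j := by
    rw [PySem.List.length_pyRange_one]; simp
  have hL : (PySem.List.pyRange 0 ((n : Int) + 1) 1).eraseIdx j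
      = PySem.List.pyRange 0 (j : Int) 1 ++ PySem.List.pyRange ((j : Int) + 1) ((n : Int) + 1) 1 := by
    rw [hsplit, List.eraseIdx_append, if_neg (by omega), hlen]
    simp
  rw [hL, PySem.List.pyRange_one_append 0 (j : Int) (n : Int) (by positivity) (by omega),
    List.map_append]
  have h1 : ∀ x ∈ PySem.List.pyRange 0 (j : Int) 1, (if (j : Int) ≤ x then x + 1 else x) = x := by
    intro x hx
    rw [PySem.List.mem_pyRange_one] at hx
    rw [if_neg (by omega)]
  have h2 : ∀ x ∈ PySem.List.pyRange (j : Int) (n : Int) 1, (if (j : Int) ≤ x then x + 1 else x) = x + 1 := by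
    intro x hx
    rw [PySem.List.mem_pyRange_one] at hx
    rw [if_pos hx.1]
  congr 1
  · rw [List.map_congr_left h1]; simp
  · rw [List.map_congr_left h2, pv_map_add_one_pyRange]

lemma pv_key : ∀ (n : Nat) (k : Int), 0 ≤ k → k < (n.factorial : Int) →
    pvPop n (PySem.List.pyRange 0 (n : Int) 1) k =
      (pvCode n k).foldl (fun p d => d :: p.map (fun x => if d ≤ x then x + 1 else x)) [] := by
  intro n
  induction n with
  | zero => intro k _ _; rfl
  | succ n ih =>
    intro k hk0 hk1
    have hfpos : (0 : Int) < (n.factorial : Int) := by exact_mod_cast Nat.factorial_pos n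
    set idx := PySem.Int.floordiv k (n.factorial : Int) with hidx
    set k' := PySem.Int.mod k (n.factorial : Int) with hk'
    have hidx0 : 0 ≤ idx := by
      rw [hidx, PySem.Int.floordiv_eq_ediv_of_pos hfpos]
      exact Int.ediv_nonneg hk0 (le_of_lt hfpos)
    have hidxlt : idx < (n : Int) + 1 := by
      rw [hidx]
      rw [PySem.Int.floordiv_lt_iff_lt_mul hfpos]
      calc k < ((n+1).factorial : Int) := hk1
        _ = ((n : Int) + 1) * (n.factorial : Int) := by push_cast [Nat.factorial_succ]; ring
    have hk'0 : 0 ≤ k' := by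
      rw [hk', PySem.Int.mod_eq_emod_of_pos hfpos]
      exact Int.emod_nonneg k (by omega)
    have hk'1 : k' < (n.factorial : Int) := by
      rw [hk', PySem.Int.mod_eq_emod_of_pos hfpos]
      exact Int.emod_lt_of_pos k hfpos
    set j := idx.toNat with hj
    have hjcast : (j : Int) = idx := Int.toNat_of_nonneg hidx0
    have hjlt : j < n + 1 := by omega
    have hlen : j < (PySem.List.pyRange 0 ((n : Int) + 1) 1).length := by
      rw [PySem.List.length_pyRange_one]; omega
    have hpop : PySem.List.pop? (PySem.List.pyRange 0 ((n : Int) + 1) 1) idx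
        = some ((j : Int), (PySem.List.pyRange 0 ((n : Int) + 1) 1).eraseIdx j) := by
      rw [← hjcast, PySem.List.pop?_natCast _ j hlen, PySem.List.getElem_pyRange_one]
      simp
    have hcastn : ((n + 1 : Nat) : Int) = (n : Int) + 1 := by push_cast; ring
    simp only [pvPop, hcastn]
    rw [← hidx, ← hk']
    simp only [hpop]
    rw [pv_erase_range n j hjlt, pv_pvPop_map _ n _ k', ih k' hk'0 hk'1]
    have hcode : pvCode (n+1) k = pvCode n k' ++ [(j : Int)] := by
      rw [pvCode]
      congr 1
      · rw [hk', pv_code_mod n k hk0]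
      · rw [← hidx]
        congr 1
        rw [PySem.Int.mod_eq_emod_of_pos (by omega)]
        rw [Int.emod_eq_of_lt hidx0 hidxlt]
        exact hjcast.symm
    rw [hcode, List.foldl_append]
    simp

lemma pv_len_code : ∀ (n : Nat) (g : Int), (pvCode n g).length = n := by
  intro n
  induction n with
  | zero => intro g; rfl
  | succ n ih => intro g; simp [pvCode, ih]

lemma pv_len_decode : ∀ (l : List Int) (p : List Int),
    (l.foldl (fun p d => d :: p.map (fun x => if d ≤ x then x + 1 else x)) p).length = p.length + l.length := by
  intro l
  induction l with
  | nil => simp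
  | cons d l ih => intro p; simp [List.foldl_cons, ih]; omega

lemma pv_enumerate_zip : ∀ (xs : List Int) (s : Int),
    PySem.List.enumerate xs s = (PySem.List.pyRange s (s + xs.length) 1).zip xs := by
  intro xs
  induction xs with
  | nil => intro s; simp [PySem.List.enumerate_nil, PySem.List.pyRange_one_eq_nil]
  | cons x xs ih =>
    intro s
    rw [PySem.List.enumerate_cons, PySem.List.pyRange_one_cons (by simp only [List.length_cons]; push_cast; omega)]
    have hb : s + ((x :: xs).length : Int) = (1 + s) + (xs.length : Int) := by
      simp only [List.length_cons]; push_cast; ring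
    have h1 : (1 : Int) + s = s + 1 := by ring
    rw [hb, h1, List.zip_cons_cons, ih (s+1)]

-- ===== VERDICT (by name: the statement is the Claim_ definition above) =====

-- the members of size s, in cell order
def pvMembers (cell_sizes : List Int) (s : Int) : List Int :=
  ((PySem.List.enumerate cell_sizes).filter (fun p => p.2 == s)).map (fun p => p.1)

lemma pv_getD_groups (cell_sizes : List Int) (s : Int) :
    ((PySem.List.enumerate cell_sizes).foldl
        (fun d p => d.modify p.2 [] (fun v => v ++ [p.1])) (PySem.Dict.empty : PySem.Dict Int (List Int))).getD s []
      = pvMembers cell_sizes s := by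
  have hswap : (PySem.List.enumerate cell_sizes).foldl
      (fun d p => d.modify p.2 [] (fun v => v ++ [p.1])) (PySem.Dict.empty : PySem.Dict Int (List Int))
    = ((PySem.List.enumerate cell_sizes).map (fun p => (p.2, p.1))).foldl
      (fun d p => d.modify p.1 [] (fun v => v ++ [p.2])) PySem.Dict.empty := by
    rw [List.foldl_map]
  rw [hswap, PySem.Dict.getD_foldl_modify_append]
  simp [pvMembers, List.filter_map, List.map_map, Function.comp_def]

lemma pv_keys_groups (cell_sizes : List Int) :
    ((PySem.List.enumerate cell_sizes).foldl
        (fun d p => d.modify p.2 [] (fun v => v ++ [p.1])) (PySem.Dict.empty : PySem.Dict Int (List Int))).keys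
      = PySem.Set.ofList cell_sizes := by
  have h := PySem.Dict.keys_foldl_modify_key (κ := Int) (ν := List Int)
    (PySem.List.enumerate cell_sizes) (fun p => p.2) []
    (fun d p => (fun v => v ++ [p.1])) PySem.Dict.empty
  simp only [PySem.List.map_snd_enumerate] at h
  rw [show (PySem.Dict.empty : PySem.Dict Int (List Int)).keys = ([] : List Int) from rfl,
    PySem.Set.update_nil_left] at h
  exact h

lemma pv_values_groups (cell_sizes : List Int) :
    ((PySem.List.enumerate cell_sizes).foldl
        (fun d p => d.modify p.2 [] (fun v => v ++ [p.1])) (PySem.Dict.empty : PySem.Dict Int (List Int))).values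
      = (PySem.Set.ofList cell_sizes).map (pvMembers cell_sizes) := by
  have hnd : ((PySem.List.enumerate cell_sizes).foldl
      (fun d p => d.modify p.2 [] (fun v => v ++ [p.1])) (PySem.Dict.empty : PySem.Dict Int (List Int))).keys.Nodup := by
    exact PySem.Dict.nodup_keys_foldl_modify_key (κ := Int) (ν := List Int)
      (PySem.List.enumerate cell_sizes) (fun p => p.2) []
      (fun d p => (fun v => v ++ [p.1])) PySem.Dict.empty (by simp)
  rw [PySem.Dict.values_eq_map_keys _ hnd [], pv_keys_groups]
  exact List.map_congr_left (fun x _ => pv_getD_groups cell_sizes x)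

lemma pv_seen (cell_sizes : List Int) :
    cell_sizes.foldl (fun seen s => if seen.contains s then seen else seen ++ [s]) ([] : List Int)
      = PySem.Set.ofList cell_sizes := by
  rfl

lemma pv_perm_eq (n : Nat) (r : Int) (h0 : 0 ≤ r) (h1 : r < (n.factorial : Int)) :
    unrank_permutation_py r ((n : Nat) : Int) =
      (((PySem.List.pyRange 1 (((n : Nat) : Int) + 1) 1).foldl
        (fun (cst : Int × List Int) b =>
          match PySem.Int.divmod? cst.1 b with
          | some dr => (dr.1, cst.2 ++ [dr.2])
          | none => cst)
        (r, [])).2).foldl (fun p d => d :: p.map (fun x => if d ≤ x then x + 1 else x)) [] := by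
  rw [pv_bridgeC n r []]
  simp only [List.nil_append]
  rw [pv_unrank_eq n r, pv_key n r h0 h1]

lemma pv_group_step (cell_sizes : List Int) (s : Int) (acc : List Int × Int) :
    (fun (st : List Int × Int) members =>
      let k : Int := (members.length : Int)
      if k ≤ 1 then st
      else
        let group_total := pyFactorial k
        let group_rank := PySem.Int.mod st.2 group_total
        let remaining := PySem.Int.floordiv st.2 group_total
        let perm_within := unrank_permutation_py group_rank k
        let lp := ((PySem.List.pyRange 0 k 1).zip perm_within).foldl
          (fun lp p => PySem.List.pySetD lp (PySem.List.pyGetD members p.1 0) (PySem.List.pyGetD members p.2 0)) st.1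
        (lp, remaining)) acc (pvMembers cell_sizes s)
    = (fun (st : List Int × Int) size =>
      let members := ((PySem.List.enumerate cell_sizes).filter (fun p => p.2 == size)).map (fun p => p.1)
      let k : Int := (members.length : Int)
      if k ≤ 1 then st
      else
        match PySem.Int.divmod? st.2 (pyFactorial k) with
        | some qr =>
          let code := ((PySem.List.pyRange 1 (k + 1) 1).foldl
            (fun (cst : Int × List Int) b =>
              match PySem.Int.divmod? cst.1 b with
              | some dr => (dr.1, cst.2 ++ [dr.2])
              | none => cst)
            (qr.2, [])).2
          let perm := code.foldl (fun perm d => d :: perm.map (fun x => if d ≤ x then x + 1 else x)) []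
          let lp := (PySem.List.enumerate perm).foldl
            (fun lp p => PySem.List.pySetD lp (PySem.List.pyGetD members p.1 0) (PySem.List.pyGetD members p.2 0)) st.1
          (lp, qr.1)
        | none => st) acc s := by
  simp only [pvMembers]
  set ms := ((PySem.List.enumerate cell_sizes).filter (fun p => p.2 == s)).map (fun p => p.1) with hms
  set n := ms.length with hn
  by_cases h : ((n : Int)) ≤ 1
  · simp [h]
  · have hfne : pyFactorial ((n : Int)) ≠ 0 := ne_of_gt (pv_fac_pos _)
    rw [if_neg h, if_neg h, pv_divmod_ne _ _ hfne]
    simp only []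
    set r := PySem.Int.mod acc.2 (pyFactorial ((n : Int))) with hr
    have hfac : pyFactorial ((n : Int)) = (n.factorial : Int) := by simp [pyFactorial]
    have hfpos : (0 : Int) < (n.factorial : Int) := by exact_mod_cast Nat.factorial_pos n
    have hr0 : 0 ≤ r := by
      rw [hr, hfac, PySem.Int.mod_eq_emod_of_pos hfpos]
      exact Int.emod_nonneg _ (by omega)
    have hr1 : r < (n.factorial : Int) := by
      rw [hr, hfac, PySem.Int.mod_eq_emod_of_pos hfpos]
      exact Int.emod_lt_of_pos _ hfpos
    have hperm := pv_perm_eq n r hr0 hr1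
    rw [← hperm]
    have hlenP : (unrank_permutation_py r ((n : Nat) : Int)).length = n := by
      rw [hperm, pv_bridgeC n r []]
      simp only [List.nil_append]
      rw [pv_len_decode, pv_len_code]
      simp
    rw [pv_enumerate_zip (unrank_permutation_py r ((n : Nat) : Int)) 0, hlenP]
    simp

-- ===== VERDICT (by name: the statement is the Claim_ definition above) =====
theorem unrank_restricted_label_perm_py_spec : Claim_equal_unrank_restricted_label_perm_py := by
  unfold Claim_equal_unrank_restricted_label_perm_py
  intro rank cell_sizes _
  unfold Spec_unrank_restricted_label_perm_py
  unfold unrank_restricted_label_perm_py unrank_restricted_label_perm_py_alt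
  simp only [pv_values_groups, pv_seen, List.foldl_map]
  congr 1
  exact PySem.List.foldl_congr_mem _ _ _ _ (fun acc s _ => pv_group_step cell_sizes s acc)
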